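-- pv_equiv track=rewrite | github.com/saimeghanakuchana/ReorderingOAI_stablerelease | .gitignore/test/RfSimLib.py | __navigate_to_key
-- ===== SOURCE A (Python) =====
-- def __navigate_to_key(lines, path):
--         current_level = 0
--         target_level = len(path) - 1
--         key_start_indices = []
--         found = False
--
--         for i, line in enumerate(lines):
--             stripped_line = line.strip()
--             if current_level < len(path) and stripped_line.startswith(path[current_level]):
--                 key_start_indices.append(i)
--                 current_level += 1
--                 if current_level > target_level:
--                     found = True
--                     break
--
--         return key_start_indices
-- ===== SOURCE B (Python) =====
-- def __navigate_to_key(lines, path):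
--     res = []
--     pos = 0
--     for comp in path:
--         idx = None
--         for j in range(pos, len(lines)):
--             if lines[j].strip().startswith(comp):
--                 idx = j
--                 break
--         if idx is None:
--             break
--         res.append(idx)
--         pos = idx + 1
--     return res
-- ===== Notes on version B (the rewrite author's own statement) =====
-- stated objective: alternative
-- what changed: B loops over path components, each time scanning lines forward from a running position for the first matching line, instead of A's single pass over lines maintaining a current_level counter.
import Mathlib
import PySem

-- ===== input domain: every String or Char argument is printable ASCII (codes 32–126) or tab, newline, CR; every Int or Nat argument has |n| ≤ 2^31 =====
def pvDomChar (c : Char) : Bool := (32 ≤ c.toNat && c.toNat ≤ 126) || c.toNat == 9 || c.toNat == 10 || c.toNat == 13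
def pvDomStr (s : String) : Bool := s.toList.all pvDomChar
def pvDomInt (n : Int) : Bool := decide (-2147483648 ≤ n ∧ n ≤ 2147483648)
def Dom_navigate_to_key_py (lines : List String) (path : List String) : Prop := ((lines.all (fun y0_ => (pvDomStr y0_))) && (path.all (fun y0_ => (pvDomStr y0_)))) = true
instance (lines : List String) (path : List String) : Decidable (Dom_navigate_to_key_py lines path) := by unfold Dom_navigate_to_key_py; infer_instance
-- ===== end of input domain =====

-- ===== PORT A =====
-- B differs from A by decomposition only; equal return value proved below. B iterates over
-- path components with a resuming scan position instead of A's single pass with a level counter.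

-- A's for-loop with `break`, as structural recursion over the remaining lines,
-- carrying the absolute index `i`, `current_level` and the accumulator.
def navAuxA (path : List String) : List String → Nat → Nat → List Int → List Int
  | [], _, _, acc => acc
  | line :: rest, i, cl, acc =>
    if cl < path.length ∧ PySem.Str.startswith (PySem.Str.strip line) (path.getD cl "") then
      let acc' := acc ++ [(i : Int)]
      -- `if current_level > target_level: found = True; break` (target_level = len(path) - 1)
      if ((cl : Int) + 1) > ((path.length : Int) - 1) then acc'
      else navAuxA path rest (i + 1) (cl + 1) acc'
    else navAuxA path rest (i + 1) cl acc

def navigate_to_key_py (lines : List String) (path : List String) : List Int :=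
  navAuxA path lines 0 0 []

-- ===== PORT B =====
-- inner `for j in range(pos, len(lines))` with break: first j ≥ pos whose stripped line starts with comp
def scanB (lines : List String) (comp : String) (pos : Nat) : Option Nat :=
  if h : pos < lines.length then
    if PySem.Str.startswith (PySem.Str.strip (lines.getD pos "")) comp then some pos
    else scanB lines comp (pos + 1)
  else none
termination_by lines.length - pos

-- outer loop over the components of `path`, with early break when a component is not found
def goB (lines : List String) : List String → Nat → List Int
  | [], _ => []
  | comp :: cs, pos =>
    match scanB lines comp pos with
    | none => []
    | some idx => (idx : Int) :: goB lines cs (idx + 1)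

def navigate_to_key_py_alt (lines : List String) (path : List String) : List Int :=
  goB lines path 0

-- ===== PRECONDITION & SPEC =====
def Spec_navigate_to_key_py (lines : List String) (path : List String) (out : List Int) : Prop := out = navigate_to_key_py_alt lines path
instance (lines : List String) (path : List String) (out : List Int) : Decidable (Spec_navigate_to_key_py lines path out) := by unfold Spec_navigate_to_key_py; infer_instance

-- ===== CLAIM (what is proved, stated in full; the proofs are below) =====
def Claim_equal_navigate_to_key_py : Prop := ∀ (lines : List String) (path : List String), Dom_navigate_to_key_py lines path → Spec_navigate_to_key_py lines path (navigate_to_key_py lines path)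

-- ===== LEMMAS AND PROOFS =====

-- ===== VERDICT (by name: the statement is the Claim_ definition above) =====
-- A walks all remaining lines without effect once cl ≥ path.length
lemma navAuxA_done (path : List String) : ∀ (rest : List String) (i cl : Nat) (acc : List Int),
    path.length ≤ cl → navAuxA path rest i cl acc = acc := by
  intro rest
  induction rest with
  | nil => intro i cl acc _; rfl
  | cons l rs ih =>
      intro i cl acc h
      simp only [navAuxA]
      rw [if_neg (by omega ∘ And.left), ih _ _ _ h]

-- main invariant: A's loop from absolute index i at level cl equals acc ++ B's loop
lemma nav_main (lines path : List String) : ∀ (n i cl : Nat) (acc : List Int),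
    n = lines.length - i → cl < path.length →
    navAuxA path (lines.drop i) i cl acc = acc ++ goB lines (path.drop cl) i := by
  intro n
  induction n with
  | zero =>
      intro i cl acc hn hcl
      have hi : lines.length ≤ i := by omega
      have hdrop : lines.drop i = [] := List.drop_eq_nil_of_le hi
      obtain ⟨c, cs, hpc⟩ : ∃ c cs, path.drop cl = c :: cs := by
        cases h : path.drop cl with
        | nil => exact absurd (List.drop_eq_nil_iff.mp h) (by omega)
        | cons c cs => exact ⟨c, cs, rfl⟩
      have hscan : scanB lines c i = none := by
        unfold scanB; rw [dif_neg (by omega)]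
      rw [hdrop, hpc]
      simp [navAuxA, goB, hscan]
  | succ m ih =>
      intro i cl acc hn hcl
      by_cases hi : i < lines.length
      · have hdrop : lines.drop i = lines[i] :: lines.drop (i + 1) :=
          List.drop_eq_getElem_cons hi
        have hpc : path.drop cl = path[cl] :: path.drop (cl + 1) :=
          List.drop_eq_getElem_cons hcl
        have hgetD : path.getD cl "" = path[cl] := by
          simp [List.getD, List.getElem?_eq_getElem hcl]
        rw [hdrop, hpc]
        by_cases hc : PySem.Chars.startswith (PySem.Chars.strip lines[i].toList) path[cl].toList
        · -- line matches the current component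
          have hscan : scanB lines path[cl] i = some i := by
            unfold scanB
            rw [dif_pos hi]
            simp [List.getD, List.getElem?_eq_getElem hi, hc]
          simp only [navAuxA, hgetD]
          rw [if_pos ⟨hcl, by simp [hc]⟩]
          simp only [goB, hscan]
          by_cases hlast : cl + 1 = path.length
          · have hb : ((cl : Int) + 1) > ((path.length : Int) - 1) := by omega
            have hcs0 : path.drop (cl + 1) = [] := List.drop_eq_nil_of_le (by omega)
            simp [hb, hcs0, goB]
          · have hb : ¬ (((cl : Int) + 1) > ((path.length : Int) - 1)) := by omega
            rw [if_neg hb, ih (i + 1) (cl + 1) (acc ++ [(i : Int)]) (by omega) (by omega)]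
            simp
        · -- no match: both sides step to index i + 1
          have hscan : scanB lines path[cl] i = scanB lines path[cl] (i + 1) := by
            conv_lhs => unfold scanB
            rw [dif_pos hi]
            simp [List.getD, List.getElem?_eq_getElem hi, hc]
          simp only [navAuxA, hgetD]
          rw [if_neg (fun h => hc (by simpa using h.2))]
          rw [ih (i + 1) cl acc (by omega) hcl, hpc]
          simp [goB, hscan]
      · have hdrop : lines.drop i = [] := List.drop_eq_nil_of_le (by omega)
        have hpc : path.drop cl = path[cl] :: path.drop (cl + 1) :=
          List.drop_eq_getElem_cons hcl
        have hscan : scanB lines path[cl] i = none := by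
          unfold scanB; rw [dif_neg (by omega)]
        rw [hdrop, hpc]
        simp [navAuxA, goB, hscan]

theorem navigate_to_key_py_spec : Claim_equal_navigate_to_key_py := by
  intro lines path _
  unfold Spec_navigate_to_key_py navigate_to_key_py navigate_to_key_py_alt
  by_cases h : 0 < path.length
  · have := nav_main lines path (lines.length - 0) 0 0 [] rfl h
    simpa using this
  · have hp : path = [] := by
      cases path with
      | nil => rfl
      | cons a l => simp at h
    subst hp
    have := navAuxA_done [] lines 0 0 [] (by simp)
    simpa [goB] using this
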